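-- pv_equiv track=rewrite | github.com/avjui/xbmc-nzbs | default.py | sort_filename
-- ===== SOURCE A (Python) =====
-- def sort_filename(filenameList):
--     outList = filenameList[:]
--     if len(filenameList) == 1:
--         return outList
--     else:
--         for i in range(len(filenameList)):
--             # TODO more file types
--             if not ".avi" or not ".mkv" in filenameList[i]:
--                 outList.remove(filenameList[i])
--         if len(outList) == 0:
--             outList.append(filenameList[0])
--         return outList
-- ===== SOURCE B (Python) =====
-- def sort_filename(filenameList):
--     if len(filenameList) == 1:
--         return filenameList[:]
--     result = [x for x in filenameList if ".mkv" in x]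
--     if not result:
--         result.append(filenameList[0])
--     return result
-- ===== Notes on version B (the rewrite author's own statement) =====
-- stated objective: faster
-- what changed: Replaces A's remove-by-value-while-iterating over a mutating copy (each removal is a linear scan) with a single forward filter pass keeping the '.mkv' entries; the len==1 early return and the fallback to the first element when nothing matches are kept.
import Mathlib
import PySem

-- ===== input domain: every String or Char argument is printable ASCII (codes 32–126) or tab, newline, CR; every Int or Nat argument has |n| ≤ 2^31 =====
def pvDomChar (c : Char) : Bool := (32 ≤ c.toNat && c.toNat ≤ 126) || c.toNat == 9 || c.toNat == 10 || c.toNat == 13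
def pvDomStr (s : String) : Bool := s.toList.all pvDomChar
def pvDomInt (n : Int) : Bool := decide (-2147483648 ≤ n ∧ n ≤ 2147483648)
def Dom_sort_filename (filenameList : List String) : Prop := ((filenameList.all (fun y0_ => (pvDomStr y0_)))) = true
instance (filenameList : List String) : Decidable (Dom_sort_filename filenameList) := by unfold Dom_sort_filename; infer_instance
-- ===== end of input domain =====

-- B replaces A's remove-by-value loop over a mutating copy with one forward filter pass (simpler, O(n) vs O(n^2)).

-- ===== PORT A =====
-- `if not ".avi" or not ".mkv" in filenameList[i]`: `not ".avi"` is the constant False,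
-- so the Python condition is `False or (".mkv" not in filenameList[i])`, ported literally below.
-- `outList.remove(...)`: `remove?` returns none exactly where Python raises ValueError; the removed
-- value was put into outList by the copy and removal counts are balanced, so none is unreachable
-- (the `.getD acc` default is never taken).  `filenameList[0]` at the end: pyGet? is none only for
-- the empty list (IndexError), excluded by Pre_.
def sort_filename (filenameList : List String) : List String :=
  let outList := filenameList
  if filenameList.length == 1 then outList
  else
    let outList := (PySem.List.pyRange 0 filenameList.length 1).foldl
      (fun acc i =>
        if (false || !(PySem.Str.isIn ".mkv" (PySem.List.pyGetD filenameList i ""))) then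
          (PySem.List.remove? acc (PySem.List.pyGetD filenameList i "")).getD acc
        else acc) outList
    if outList.length == 0 then outList ++ [(PySem.List.pyGet? filenameList 0).getD ""]
    else outList

-- ===== PORT B =====
def sort_filename_alt (filenameList : List String) : List String :=
  if filenameList.length == 1 then filenameList
  else
    let result := filenameList.filter (fun x => PySem.Str.isIn ".mkv" x)
    if result.length == 0 then result ++ [(PySem.List.pyGet? filenameList 0).getD ""]
    else result

-- ===== PRECONDITION & SPEC =====
-- Pre_ excludes only the empty list, on which Python A raises IndexError (filenameList[0]).
def Pre_sort_filename (filenameList : List String) : Prop := filenameList ≠ []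
instance (filenameList : List String) : Decidable (Pre_sort_filename filenameList) := by
  unfold Pre_sort_filename; infer_instance
def pvWitness_sort_filename : List String := ["a.mkv", "b.avi"]
def Spec_sort_filename (filenameList : List String) (out : List String) : Prop := out = sort_filename_alt filenameList
instance (filenameList : List String) (out : List String) : Decidable (Spec_sort_filename filenameList out) := by unfold Spec_sort_filename; infer_instance

-- ===== CLAIM (what is proved, stated in full; the proofs are below) =====
def Claim_equal_sort_filename : Prop := ∀ (filenameList : List String), Dom_sort_filename filenameList → Pre_sort_filename filenameList → Spec_sort_filename filenameList (sort_filename filenameList)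

-- ===== LEMMAS AND PROOFS =====

-- A's remove loop: processing a suffix against `pre ++ suf` where every element of `pre`
-- already passes the test leaves exactly `pre ++ suf.filter P`.
theorem pv_remove_loop (P : String → Bool) :
    ∀ (suf pre : List String), (∀ y ∈ pre, P y = true) →
    suf.foldl (fun acc x => if !(P x) then (PySem.List.remove? acc x).getD acc else acc)
      (pre ++ suf) = pre ++ suf.filter P := by
  intro suf
  induction suf with
  | nil => intro pre _; simp
  | cons x suf ih =>
    intro pre hpre
    by_cases hx : P x = true
    · have h1 : (pre ++ x :: suf) = (pre ++ [x]) ++ suf := by simp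
      simp only [List.foldl_cons, hx, Bool.not_true, Bool.false_eq_true, if_false]
      rw [h1, ih (pre ++ [x]) (by intro y hy; rcases List.mem_append.1 hy with h | h
                                  · exact hpre y h
                                  · simp at h; simpa [h] using hx)]
      simp [hx]
    · have hxm : x ∈ pre ++ x :: suf := by simp
      have hxp : x ∉ pre := fun h => hx (hpre x h)
      have hrem : PySem.List.remove? (pre ++ x :: suf) x = some (pre ++ suf) := by
        rw [PySem.List.remove?_eq_some_erase _ _ hxm, List.erase_append_right _ hxp,
          List.erase_cons_head]
      simp only [List.foldl_cons]
      rw [if_pos (by simp [hx]), hrem]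
      simp only [Option.getD_some]
      rw [ih pre hpre]
      simp [hx]

-- A's index loop over pyRange equals the element loop.
theorem pv_loop_eq_filter (l : List String) :
    (PySem.List.pyRange 0 l.length 1).foldl
      (fun acc i =>
        if (false || !(PySem.Str.isIn ".mkv" (PySem.List.pyGetD l i ""))) then
          (PySem.List.remove? acc (PySem.List.pyGetD l i "")).getD acc
        else acc) l = l.filter (fun x => PySem.Str.isIn ".mkv" x) := by
  have h := PySem.List.foldl_pyRange_zero_pyGetD (xs := l)
    (f := fun acc x => if !(PySem.Str.isIn ".mkv" x) then (PySem.List.remove? acc x).getD acc else acc)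
    (d := "") (init := l)
  simp only [PySem.List.len_eq] at h
  simp only [Bool.false_or]
  rw [h]
  simpa using pv_remove_loop (fun x => PySem.Str.isIn ".mkv" x) l [] (by simp)

-- ===== VERDICT (by name: the statement is the Claim_ definition above) =====
theorem sort_filename_spec : Claim_equal_sort_filename := by
  intro l _ _
  unfold Spec_sort_filename sort_filename sort_filename_alt
  simp only [pv_loop_eq_filter]
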